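-- pv_equiv track=rewrite | github.com/MohamedHmamouch/Interview_preparation | B_sheet_code_forces/petya_countryside.py | petya_countryside
-- ===== SOURCE A (Python) =====
-- def petya_countryside(n,l:list)-> int:
--
--     max_water=0
--
--     for i in range(n):
--
--         left=i-1
--         right=i+1
--
--         water_section=1
--
--         while left>=0 and l[left]<=l[left+1]:
--             water_section+=1
--
--             left-=1
--
--         while right<n and l[right]<=l[right-1]:
--
--             right+=1
--             water_section+=1
--
--         max_water=max(max_water,water_section)
--
--     return max_water
-- ===== SOURCE B (Python) =====
-- def petya_countryside(n, l: list) -> int: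
--     # O(n) DP: non-decreasing run ending at i (scanned left-to-right) plus
--     # non-increasing run starting at i (the same scan on the reversed prefix).
--     m = n if n >= 0 else 0
--     a = l[:m]
--     if not a:
--         return 0
--
--     def runs(xs):
--         out = []
--         c = 0
--         prev = None
--         for x in xs:
--             c = c + 1 if (prev is not None and prev <= x) else 1
--             out.append(c)
--             prev = x
--         return out
--
--     left = runs(a)
--     right = runs(a[::-1])[::-1]
--     return max(li + ri - 1 for li, ri in zip(left, right))
-- ===== Notes on version B (the rewrite author's own statement) =====
-- stated objective: faster
-- what changed: B replaces A's per-index left and right while-scans (quadratic) by two linear run-length DP passes (the same runs() helper applied forward and to the reversed prefix), combining left[i]+right[i]-1 per index.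
-- intended difference: On n = 1 with l = [] A returns 1 (its loop guards short-circuit, so it counts a water section in an empty landscape); B returns 0, the intended answer when there is no terrain. — e.g. on petya_countryside(1, []): A returns 1, B returns 0
import Mathlib
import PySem

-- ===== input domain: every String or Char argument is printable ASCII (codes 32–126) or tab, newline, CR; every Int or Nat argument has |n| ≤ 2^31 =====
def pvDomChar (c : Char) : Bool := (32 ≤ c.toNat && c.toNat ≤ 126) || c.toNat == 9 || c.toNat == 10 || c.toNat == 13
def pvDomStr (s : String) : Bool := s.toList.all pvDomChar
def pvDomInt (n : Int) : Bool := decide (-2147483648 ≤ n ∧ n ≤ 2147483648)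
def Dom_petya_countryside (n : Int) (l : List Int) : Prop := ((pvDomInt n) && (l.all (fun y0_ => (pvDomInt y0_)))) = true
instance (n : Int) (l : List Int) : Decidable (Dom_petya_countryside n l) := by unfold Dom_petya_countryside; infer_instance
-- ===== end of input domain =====

-- B replaces A's quadratic per-index left/right scans by two O(n) run-length DP passes.

-- ===== PORT A =====
-- left while-loop of A: number of steps from index i going left while l[left] <= l[left+1]
def aLeftRun (l : List Int) : Nat → Nat
  | 0 => 0
  | i + 1 => if l.getD i 0 ≤ l.getD (i + 1) 0 then aLeftRun l i + 1 else 0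

-- right while-loop of A: number of steps from r upward while r < n and l[r] <= l[r-1]
-- (structural recursion on the fuel n - r, so that it kernel-reduces)
def aRightRunAux (l : List Int) : Nat → Nat → Nat
  | 0, _ => 0
  | k + 1, r => if l.getD r 0 ≤ l.getD (r - 1) 0 then aRightRunAux l k (r + 1) + 1 else 0

def aRightRun (l : List Int) (n r : Nat) : Nat := aRightRunAux l (n - r) r

def petya_countryside (n : Int) (l : List Int) : Int :=
  (PySem.List.pyRange 0 n 1).foldl
    (fun mw i =>
      max mw (1 + (aLeftRun l i.toNat : Int) + (aRightRun l n.toNat (i.toNat + 1) : Int))) 0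

-- ===== PORT B =====
-- B's helper runs(xs): running non-decreasing run lengths (prev carried explicitly)
def bRunsGo (prev : Int) (c : Nat) : List Int → List Nat
  | [] => []
  | x :: xs =>
    let c' := if prev ≤ x then c + 1 else 1
    c' :: bRunsGo x c' xs

def bRuns : List Int → List Nat
  | [] => []
  | x :: xs => 1 :: bRunsGo x 1 xs

def petya_countryside_alt (n : Int) (l : List Int) : Int :=
  match ((bRuns (l.take n.toNat)).zip ((bRuns (l.take n.toNat).reverse).reverse)).map
      (fun p => (p.1 : Int) + (p.2 : Int) - 1) with
  | [] => 0
  | x :: xs => xs.foldl max x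

-- ===== PRECONDITION & SPEC =====
-- Pre_ is exactly where Python A returns normally: n ≤ len(l) (the for/while loops
-- then index in range), plus the lone degenerate point n = 1, l = [] where A's loop
-- guards short-circuit and it returns without indexing.
def Pre_petya_countryside (n : Int) (l : List Int) : Prop :=
  n ≤ (l.length : Int) ∨ (n = 1 ∧ l = [])
instance (n : Int) (l : List Int) : Decidable (Pre_petya_countryside n l) := by
  unfold Pre_petya_countryside; infer_instance

def pvWitness_petya_countryside : Int × List Int := (3, [1, 2, 1])

-- On n = 1 with l = [] A returns 1 (a water section counted in an empty landscape,
-- an artefact of its loop guards); B returns 0, the intended answer for no terrain.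
def D_petya_countryside (n : Int) (l : List Int) : Prop := n = 1 ∧ l = []
instance (n : Int) (l : List Int) : Decidable (D_petya_countryside n l) := by
  unfold D_petya_countryside; infer_instance

def Spec_petya_countryside (n : Int) (l : List Int) (out : Int) : Prop :=
  ¬ D_petya_countryside n l → out = petya_countryside_alt n l
instance (n : Int) (l : List Int) (out : Int) : Decidable (Spec_petya_countryside n l out) := by
  unfold Spec_petya_countryside; infer_instance

def pvDiffWitness_petya_countryside : Int × List Int := (1, [])
def pvDiffWitnessOut_petya_countryside : Int × Int := (1, 0)

-- ===== CLAIM (what is proved, stated in full; the proofs are below) =====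
def Claim_unchanged_petya_countryside : Prop := ∀ (n : Int) (l : List Int), Dom_petya_countryside n l → Pre_petya_countryside n l → Spec_petya_countryside n l (petya_countryside n l)
def Claim_changed_petya_countryside : Prop := Dom_petya_countryside (pvDiffWitness_petya_countryside.1) (pvDiffWitness_petya_countryside.2) ∧ Pre_petya_countryside (pvDiffWitness_petya_countryside.1) (pvDiffWitness_petya_countryside.2) ∧ D_petya_countryside (pvDiffWitness_petya_countryside.1) (pvDiffWitness_petya_countryside.2) ∧ petya_countryside (pvDiffWitness_petya_countryside.1) (pvDiffWitness_petya_countryside.2) = pvDiffWitnessOut_petya_countryside.1 ∧ petya_countryside_alt (pvDiffWitness_petya_countryside.1) (pvDiffWitness_petya_countryside.2) = pvDiffWitnessOut_petya_countryside.2 ∧ pvDiffWitnessOut_petya_countryside.1 ≠ pvDiffWitnessOut_petya_countryside.2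
def Claim_exact_petya_countryside : Prop := ∀ (n : Int) (l : List Int), Dom_petya_countryside n l → Pre_petya_countryside n l → D_petya_countryside n l → petya_countryside n l ≠ petya_countryside_alt n l

-- ===== LEMMAS AND PROOFS =====

lemma aRightRun_step (l : List Int) (n r : Nat) :
    aRightRun l n r
      = if r < n then
          (if l.getD r 0 ≤ l.getD (r - 1) 0 then aRightRun l n (r + 1) + 1 else 0)
        else 0 := by
  unfold aRightRun
  rcases h : n - r with _ | k
  · have hrn : ¬ r < n := by omega
    simp [hrn, aRightRunAux]
  · have hrn : r < n := by omega
    have hk : n - (r + 1) = k := by omega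
    simp [aRightRunAux, hrn, hk]

lemma getD_take_eq (l : List Int) (m j : Nat) (hj : j < m) (hm : m ≤ l.length) :
    (l.take m).getD j 0 = l.getD j 0 := by
  rw [List.getD_eq_getElem?_getD, List.getD_eq_getElem?_getD, List.getElem?_take_of_lt hj]

lemma aLeftRun_take (l : List Int) (m : Nat) (hm : m ≤ l.length) :
    ∀ i, i < m → aLeftRun (l.take m) i = aLeftRun l i := by
  intro i
  induction i with
  | zero => intro _; rfl
  | succ i ih =>
    intro hi
    simp only [aLeftRun, getD_take_eq l m i (by omega) hm, getD_take_eq l m (i+1) (by omega) hm,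
      ih (by omega)]

lemma aRightRun_take (l : List Int) (m : Nat) (hm : m ≤ l.length) :
    ∀ r, aRightRun (l.take m) m r = aRightRun l m r := by
  intro r
  induction' hr : m - r using Nat.strong_induction_on with k ih generalizing r
  rw [aRightRun_step (l.take m) m r, aRightRun_step l m r]
  by_cases h : r < m
  · simp only [h, if_true]
    rw [getD_take_eq l m r h hm, getD_take_eq l m (r-1) (by omega) hm,
      ih (m - (r+1)) (by omega) (r+1) rfl]
  · simp [h]

lemma bRunsGo_spec (xs : List Int) : ∀ (a : List Int) (k : Nat),
    a.drop (k + 1) = xs → k < a.length →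
    bRunsGo (a.getD k 0) (aLeftRun a k + 1) xs
      = (List.range xs.length).map (fun j => aLeftRun a (k + 1 + j) + 1) := by
  induction xs with
  | nil => intro a k _ _; rfl
  | cons x xs ih =>
    intro a k hdrop hk
    have hk1 : k + 1 < a.length := by
      by_contra h
      rw [List.drop_eq_nil_of_le (by omega)] at hdrop
      exact (List.cons_ne_nil x xs) hdrop.symm
    have hx : a.getD (k + 1) 0 = x := by
      have h9 : a[k + 1 + 0]? = some x := by
        rw [← List.getElem?_drop, hdrop]; rfl
      rw [List.getD_eq_getElem?_getD]
      simp only [Nat.add_zero] at h9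
      rw [h9]
      rfl
    have hdrop' : a.drop (k + 2) = xs := by
      have : a.drop (k + 2) = (a.drop (k + 1)).drop 1 := by
        rw [List.drop_drop]
      rw [this, hdrop]; rfl
    have hc' : (if a.getD k 0 ≤ x then aLeftRun a k + 1 + 1 else 1)
        = aLeftRun a (k + 1) + 1 := by
      rw [← hx]
      simp only [aLeftRun]
      split_ifs <;> rfl
    simp only [bRunsGo, hc']
    rw [← hx, ih a (k + 1) hdrop' hk1]
    rw [List.length_cons, List.range_succ_eq_map, List.map_cons, List.map_map]
    refine List.cons_eq_cons.mpr ⟨by norm_num, List.map_congr_left ?_⟩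
    intro j _
    simp only [Function.comp_apply]
    congr 2
    omega

lemma bRuns_spec (a : List Int) :
    bRuns a = (List.range a.length).map (fun i => aLeftRun a i + 1) := by
  cases a with
  | nil => rfl
  | cons x xs =>
    have h0 : (x :: xs).getD 0 0 = x := rfl
    have hgo : bRunsGo x 1 xs
        = (List.range xs.length).map (fun j => aLeftRun (x :: xs) (0 + 1 + j) + 1) := by
      rw [← h0]
      exact bRunsGo_spec xs (x :: xs) 0 rfl (by simp)
    rw [show bRuns (x :: xs) = 1 :: bRunsGo x 1 xs from rfl, hgo]
    rw [List.length_cons, List.range_succ_eq_map, List.map_cons, List.map_map]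
    refine List.cons_eq_cons.mpr ⟨by norm_num [aLeftRun], List.map_congr_left ?_⟩
    intro j _
    simp only [Function.comp_apply]
    congr 2
    omega

lemma bRuns_length (a : List Int) : (bRuns a).length = a.length := by
  rw [bRuns_spec]; simp

lemma aLeftRun_reverse (a : List Int) :
    ∀ j, j < a.length → aLeftRun a.reverse j = aRightRun a a.length (a.length - j) := by
  intro j
  induction j with
  | zero =>
    intro _
    rw [aRightRun_step]
    simp [aLeftRun]
  | succ j ih =>
    intro hj
    have hlen : a.reverse.length = a.length := by simp
    have hbj : a.reverse.getD j 0 = a.getD (a.length - 1 - j) 0 := by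
      rw [List.getD_eq_getElem a.reverse 0 (by omega),
        List.getD_eq_getElem a 0 (by omega), List.getElem_reverse]
    have hbj1 : a.reverse.getD (j + 1) 0 = a.getD (a.length - 1 - (j + 1)) 0 := by
      rw [List.getD_eq_getElem a.reverse 0 (by omega),
        List.getD_eq_getElem a 0 (by omega), List.getElem_reverse]
    have hr : a.length - (j + 1) < a.length := by omega
    rw [aRightRun_step]
    simp only [hr, if_true]
    have e1 : a.length - (j + 1) - 1 = a.length - 1 - (j + 1) := by omega
    have e2 : a.length - (j + 1) + 1 = a.length - j := by omega
    have e3 : a.length - (j + 1) = a.length - 1 - j := by omega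
    rw [e1, e2, e3]
    simp only [aLeftRun, hbj, hbj1]
    rw [ih (by omega)]

lemma runs_reverse_spec (a : List Int) :
    (bRuns a.reverse).reverse
      = (List.range a.length).map (fun i => aRightRun a a.length (i + 1) + 1) := by
  apply List.ext_getElem
  · simp [bRuns_length]
  · intro i h1 h2
    have hlen : (bRuns a.reverse).length = a.length := by simp [bRuns_length]
    have hi : i < a.length := by simpa using h2
    rw [List.getElem_reverse, List.getElem_map, List.getElem_range,
      List.getElem_of_eq (bRuns_spec a.reverse), List.getElem_map, List.getElem_range]
    have hj : (bRuns a.reverse).length - 1 - i = a.length - 1 - i := by rw [hlen]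
    rw [hj, aLeftRun_reverse a (a.length - 1 - i) (by omega)]
    congr 2
    omega

lemma mapped_list_eq (a : List Int) :
    ((bRuns a).zip ((bRuns a.reverse).reverse)).map
        (fun p => (p.1 : Int) + (p.2 : Int) - 1)
      = (List.range a.length).map
          (fun i => 1 + (aLeftRun a i : Int) + (aRightRun a a.length (i + 1) : Int)) := by
  rw [bRuns_spec, runs_reverse_spec, List.zip_map']
  rw [List.map_map]
  apply List.map_congr_left
  intro i _
  simp only [Function.comp]
  push_cast
  ring

-- A's fold over range m with the per-index water value
lemma a_side_eq (n : Int) (l : List Int) (hn : 0 ≤ n) :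
    petya_countryside n l
      = (List.range n.toNat).foldl
          (fun mw k =>
            max mw (1 + (aLeftRun l k : Int) + (aRightRun l n.toNat (k + 1) : Int))) 0 := by
  unfold petya_countryside
  rw [PySem.List.pyRange_one]
  rw [List.foldl_map]
  simp only [sub_zero, zero_add, Int.toNat_natCast]

lemma foldl_congr_range (m : Nat) (f g : Int → Nat → Int)
    (h : ∀ acc k, k < m → f acc k = g acc k) :
    (List.range m).foldl f 0 = (List.range m).foldl g 0 := by
  have key : ∀ (m : Nat), (∀ acc k, k < m → f acc k = g acc k) →
      ∀ (init : Int), (List.range m).foldl f init = (List.range m).foldl g init := by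
    intro m
    induction m with
    | zero => intro _ init; rfl
    | succ m ih =>
      intro h init
      rw [List.range_succ, List.foldl_append, List.foldl_append]
      simp only [List.foldl_cons, List.foldl_nil]
      rw [ih (fun acc k hk => h acc k (by omega)) init, h _ m (by omega)]
  exact key m h 0

theorem petya_countryside_spec : Claim_unchanged_petya_countryside := by
  intro n l _hdom hpre
  intro hnd
  have hle : n ≤ (l.length : Int) := by
    rcases hpre with h | h
    · exact h
    · exact absurd h hnd
  show petya_countryside n l = petya_countryside_alt n l
  by_cases hn : 0 ≤ n
  case neg =>
    have h1 : PySem.List.pyRange 0 n 1 = [] := PySem.List.pyRange_one_eq_nil (by omega)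
    have h2 : n.toNat = 0 := by omega
    unfold petya_countryside petya_countryside_alt
    rw [h1, h2]
    rfl
  case pos =>
    set m : Nat := n.toNat with hm
    have hmlen : m ≤ l.length := by omega
    set a : List Int := l.take m with ha
    have halen : a.length = m := by simp [ha]; omega
    unfold petya_countryside_alt
    rw [← hm, ← ha, mapped_list_eq a, halen]
    rw [a_side_eq n l hn, ← hm]
    rw [foldl_congr_range m _
      (fun mw k =>
        max mw (1 + (aLeftRun a k : Int) + (aRightRun a m (k + 1) : Int)))
      (by
        intro acc k hk
        show max acc (1 + (aLeftRun l k : Int) + (aRightRun l m (k + 1) : Int))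
            = max acc (1 + (aLeftRun (l.take m) k : Int) + (aRightRun (l.take m) m (k + 1) : Int))
        rw [aLeftRun_take l m hmlen k hk, aRightRun_take l m hmlen (k + 1)])]
    cases m with
    | zero => rfl
    | succ m' =>
      rw [List.range_succ_eq_map, List.map_cons, List.foldl_cons, List.map_map]
      have hW0 : (0 : Int) ≤ 1 + (aLeftRun a 0 : Int) + (aRightRun a (m' + 1) 1 : Int) := by
        positivity
      rw [max_eq_right hW0]
      rw [List.foldl_map]
      show List.foldl _ _ (List.range m')
          = List.foldl max
              (1 + (aLeftRun a 0 : Int) + (aRightRun a (m' + 1) (0 + 1) : Int))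
              (List.map
                ((fun i => 1 + (aLeftRun a i : Int) + (aRightRun a (m' + 1) (i + 1) : Int))
                  ∘ Nat.succ)
                (List.range m'))
      rw [List.foldl_map]
      rfl

theorem petya_countryside_changed : Claim_changed_petya_countryside := by
  unfold Claim_changed_petya_countryside; decide

theorem petya_countryside_tight : Claim_exact_petya_countryside := by
  intro n l _ _ hd
  obtain ⟨hn, hl⟩ := hd
  subst hn; subst hl
  decide
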